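-- pv_equiv track=rewrite | github.com/aaronnorrish/timetable_scheduler | timetable_scheduler.py | det_g_flag
-- ===== SOURCE A (Python) =====
-- def det_g_flag(timetable, g): # need better testing
--     for day in range(1, 6):
--         class_started = False
--         gap = False
--         gap_duration = 0
--         for timeslot in range(1, len(timetable), 2):
--             if timetable[timeslot][day] != "" and not class_started:
--                 if gap:
--                     if gap_duration > g:
--                         return False
--                     gap = False
--                 class_started = True
--             elif timetable[timeslot][day] == "":
--                 if class_started:
--                     gap = True
--                     class_started = False
--                 if gap:
--                     gap_duration += 1
--     return True
-- ===== SOURCE B (Python) =====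
-- def det_g_flag(timetable, g):
--     for day in range(1, 6):
--         first = None
--         last = None
--         occ = 0
--         pos = 0
--         for timeslot in range(1, len(timetable), 2):
--             if timetable[timeslot][day] != "":
--                 if first is None:
--                     first = pos
--                 last = pos
--                 occ += 1
--             pos += 1
--         if first is not None:
--             gaps = (last - first + 1) - occ
--             if gaps > 0 and gaps > g:
--                 return False
--     return True
-- ===== Notes on version B (the rewrite author's own statement) =====
-- stated objective: simpler
-- what changed: Replaces A's stateful class_started/gap/gap_duration simulation per day with a single scan recording the first and last occupied stepped slot and the occupied count, then checks gaps = (last - first + 1) - occ directly (False iff gaps > 0 and gaps > g).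
import Mathlib
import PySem

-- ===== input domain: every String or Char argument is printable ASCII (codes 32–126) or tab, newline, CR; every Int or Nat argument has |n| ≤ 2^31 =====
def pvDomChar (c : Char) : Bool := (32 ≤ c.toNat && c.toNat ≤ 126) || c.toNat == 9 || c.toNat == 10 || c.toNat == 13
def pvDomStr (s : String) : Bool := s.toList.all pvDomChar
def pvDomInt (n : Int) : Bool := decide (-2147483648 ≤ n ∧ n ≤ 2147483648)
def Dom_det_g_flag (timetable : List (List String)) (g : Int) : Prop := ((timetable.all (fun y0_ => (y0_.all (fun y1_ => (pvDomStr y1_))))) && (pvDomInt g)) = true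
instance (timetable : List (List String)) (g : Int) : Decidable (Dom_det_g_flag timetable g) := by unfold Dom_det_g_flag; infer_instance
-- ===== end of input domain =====

-- B replaces A's stateful gap-flag simulation by a direct first/last/count scan per day
-- (gaps = span between first and last occupied stepped slot minus the occupied count); objective: simpler.

-- ===== PORT A =====
-- timetable[timeslot][day]; pyGetD is exact here: under Pre_det_g_flag both indices are in range.
def pvCell (t : List (List String)) (ts day : Int) : String :=
  PySem.List.pyGetD (PySem.List.pyGetD t ts []) day ""

-- A's inner loop over the remaining timeslot indices, state (class_started, gap, gap_duration);
-- result false = Python's early 'return False', true = loop ran to the end.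
def pvALoop (t : List (List String)) (g day : Int) : List Int → Bool → Bool → Int → Bool
  | [], _, _, _ => true
  | ts :: rest, cs, gap, gd =>
    let c := pvCell t ts day
    if c ≠ "" ∧ cs = false then
      if gap then
        if gd > g then false
        else pvALoop t g day rest true false gd
      else pvALoop t g day rest true gap gd
    else if c = "" then
      let cs' := if cs then false else cs
      let gap' := if cs then true else gap
      let gd' := if gap' then gd + 1 else gd
      pvALoop t g day rest cs' gap' gd'
    else pvALoop t g day rest cs gap gd

def pvADays (t : List (List String)) (g : Int) : List Int → Bool
  | [] => true
  | day :: rest =>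
    if pvALoop t g day (PySem.List.pyRange 1 (PySem.List.len t) 2) false false 0 then
      pvADays t g rest
    else false

def det_g_flag (timetable : List (List String)) (g : Int) : Bool :=
  pvADays timetable g (PySem.List.pyRange 1 6 1)

-- ===== PORT B =====
-- B's inner loop: enumeration position pos, first/last occupied position, occupied count.
def pvBScan (t : List (List String)) (day : Int) :
    List Int → Int → Option Int → Option Int → Int → Option Int × Option Int × Int
  | [], _, first, last, occ => (first, last, occ)
  | ts :: rest, pos, first, last, occ =>
    if pvCell t ts day ≠ "" then
      let first' := if first = none then some pos else first
      pvBScan t day rest (pos + 1) first' (some pos) (occ + 1)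
    else pvBScan t day rest (pos + 1) first last occ

-- per-day verdict: false iff gaps > 0 and gaps > g
def pvBDayGo (t : List (List String)) (g day : Int) (l : List Int) : Bool :=
  match pvBScan t day l 0 none none 0 with
  | (some f, some lv, occ) => decide ¬(0 < lv - f + 1 - occ ∧ g < lv - f + 1 - occ)
  | _ => true

def pvBDays (t : List (List String)) (g : Int) : List Int → Bool
  | [] => true
  | day :: rest =>
    if pvBDayGo t g day (PySem.List.pyRange 1 (PySem.List.len t) 2) then
      pvBDays t g rest
    else false

def det_g_flag_alt (timetable : List (List String)) (g : Int) : Bool :=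
  pvBDays timetable g (PySem.List.pyRange 1 6 1)

-- ===== PRECONDITION & SPEC =====
-- Pre_ excludes the inputs where indexing timetable[timeslot][day] (day = 1..5) would raise
-- IndexError: every row at an odd index must have length ≥ 6.  This is slightly narrower than
-- A's exact return set: A can 'return False' at an early timeslot before ever reading a later
-- short row; B scans the whole day first and raises there, so those inputs are excluded too.
def Pre_det_g_flag (timetable : List (List String)) (g : Int) : Prop :=
  ∀ ts ∈ PySem.List.pyRange 1 (PySem.List.len timetable) 2,
    6 ≤ (PySem.List.pyGetD timetable ts []).length

instance (timetable : List (List String)) (g : Int) : Decidable (Pre_det_g_flag timetable g) := by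
  unfold Pre_det_g_flag; infer_instance

def pvWitness_det_g_flag : List (List String) × Int :=
  ([[], ["", "a", "", "", "", ""], [], ["", "", "", "", "", ""], [], ["", "b", "", "", "", ""]], 1)

def Spec_det_g_flag (timetable : List (List String)) (g : Int) (out : Bool) : Prop := out = det_g_flag_alt timetable g
instance (timetable : List (List String)) (g : Int) (out : Bool) : Decidable (Spec_det_g_flag timetable g out) := by unfold Spec_det_g_flag; infer_instance

-- ===== CLAIM (what is proved, stated in full; the proofs are below) =====
def Claim_equal_det_g_flag : Prop := ∀ (timetable : List (List String)) (g : Int), Dom_det_g_flag timetable g → Pre_det_g_flag timetable g → Spec_det_g_flag timetable g (det_g_flag timetable g)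

-- ===== LEMMAS AND PROOFS =====

-- abstraction of one day's column to occupancy booleans
def pvBmap (t : List (List String)) (day : Int) (l : List Int) : List Bool :=
  l.map (fun ts => decide (pvCell t ts day ≠ ""))

def pvHasT : List Bool → Bool
  | [] => false
  | b :: bs => b || pvHasT bs

-- number of `false`s strictly before the last `true` (0 if no `true`)
def pvEcnt : List Bool → Int
  | [] => 0
  | b :: bs => if pvHasT bs then (if b then pvEcnt bs else pvEcnt bs + 1) else 0

def pvCnt : List Bool → Int
  | [] => 0
  | b :: bs => (if b then 1 else 0) + pvCnt bs

-- index of the last `true` (meaningful only when pvHasT)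
def pvLIdx : List Bool → Int
  | [] => 0
  | _ :: bs => if pvHasT bs then pvLIdx bs + 1 else 0

-- common per-day specification both ports are reduced to
def pvDaySpec (g : Int) : List Bool → Bool
  | [] => true
  | b :: bs => if b then decide ¬(0 < pvEcnt bs ∧ g < pvEcnt bs) else pvDaySpec g bs

theorem pvEcnt_nonneg (bs : List Bool) : 0 ≤ pvEcnt bs := by
  induction bs with
  | nil => simp [pvEcnt]
  | cons b bs ih => simp only [pvEcnt]; split_ifs <;> omega

theorem pvCnt_nonneg (bs : List Bool) : 0 ≤ pvCnt bs := by
  induction bs with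
  | nil => simp [pvCnt]
  | cons b bs ih => simp only [pvCnt]; split_ifs <;> omega

theorem pvEcnt_of_not_hasT (bs : List Bool) (h : pvHasT bs = false) : pvEcnt bs = 0 := by
  cases bs with
  | nil => rfl
  | cons b bs =>
    simp only [pvHasT, Bool.or_eq_false_iff] at h
    simp [pvEcnt, h.2]

theorem pvCnt_of_not_hasT (bs : List Bool) (h : pvHasT bs = false) : pvCnt bs = 0 := by
  induction bs with
  | nil => rfl
  | cons b bs ih =>
    simp only [pvHasT, Bool.or_eq_false_iff] at h
    simp [pvCnt, h.1, ih h.2]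

theorem pvLIdx_eq (bs : List Bool) (h : pvHasT bs = true) :
    pvLIdx bs = pvEcnt bs + pvCnt bs - 1 := by
  induction bs with
  | nil => simp [pvHasT] at h
  | cons b bs ih =>
    by_cases hT : pvHasT bs = true
    · simp only [pvLIdx, pvEcnt, pvCnt, hT, if_true, ih hT]
      split_ifs <;> omega
    · simp only [Bool.not_eq_true] at hT
      simp only [pvHasT, hT, Bool.or_false] at h
      simp [pvLIdx, pvEcnt, pvCnt, hT, h, pvCnt_of_not_hasT bs hT]

-- A's loop from the two reachable post-start states
theorem pvALoop_started (t : List (List String)) (g day : Int) (l : List Int) :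
    ∀ gd : Int,
      (pvALoop t g day l true false gd
        = decide ¬(0 < pvEcnt (pvBmap t day l) ∧ g < gd + pvEcnt (pvBmap t day l))) ∧
      (pvALoop t g day l false true gd
        = decide ¬(pvHasT (pvBmap t day l) = true ∧ g < gd + pvEcnt (pvBmap t day l))) := by
  induction l with
  | nil => intro gd; constructor <;> simp [pvALoop, pvBmap, pvEcnt, pvHasT]
  | cons ts rest ih =>
    intro gd
    have hBm : pvBmap t day (ts :: rest) = decide (pvCell t ts day ≠ "") :: pvBmap t day rest := rfl
    have hE0 := pvEcnt_nonneg (pvBmap t day rest)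
    constructor
    · -- state (class_started := true, gap := false, gd)
      by_cases hc : pvCell t ts day = ""
      · -- empty cell: go to gap state with gd+1
        have h1 : pvALoop t g day (ts :: rest) true false gd
            = pvALoop t g day rest false true (gd + 1) := by
          simp [pvALoop, hc]
        rw [h1, (ih (gd + 1)).2, hBm]
        by_cases hT : pvHasT (pvBmap t day rest) = true
        · simp only [pvEcnt, hT, if_true, hc, ne_eq, not_true_eq_false, decide_false,
            Bool.false_eq_true, if_false, true_and, decide_eq_decide]
          omega
        · simp only [Bool.not_eq_true] at hT
          simp [pvEcnt, hT, pvEcnt_of_not_hasT _ hT]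
      · -- occupied cell: state unchanged
        have h1 : pvALoop t g day (ts :: rest) true false gd
            = pvALoop t g day rest true false gd := by
          simp [pvALoop, hc]
        rw [h1, (ih gd).1, hBm]
        by_cases hT : pvHasT (pvBmap t day rest) = true
        · simp [pvEcnt, hT, hc]
        · simp only [Bool.not_eq_true] at hT
          simp [pvEcnt, hT, pvEcnt_of_not_hasT _ hT]
    · -- state (class_started := false, gap := true, gd)
      by_cases hc : pvCell t ts day = ""
      · have h1 : pvALoop t g day (ts :: rest) false true gd
            = pvALoop t g day rest false true (gd + 1) := by
          simp [pvALoop, hc]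
        rw [h1, (ih (gd + 1)).2, hBm]
        by_cases hT : pvHasT (pvBmap t day rest) = true
        · simp only [pvEcnt, pvHasT, hT, if_true, hc, ne_eq, not_true_eq_false, decide_false,
            Bool.false_eq_true, if_false, Bool.false_or, true_and, decide_eq_decide]
          omega
        · simp only [Bool.not_eq_true] at hT
          simp [pvEcnt, pvHasT, hT, hc, pvEcnt_of_not_hasT _ hT]
      · -- occupied cell after a gap: the g-check fires
        have h1 : pvALoop t g day (ts :: rest) false true gd
            = if gd > g then false else pvALoop t g day rest true false gd := by
          simp [pvALoop, hc]
        rw [h1, hBm]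
        by_cases hT : pvHasT (pvBmap t day rest) = true
        · have hrhs : (decide ¬(pvHasT (decide (pvCell t ts day ≠ "") :: pvBmap t day rest) = true ∧
              g < gd + pvEcnt (decide (pvCell t ts day ≠ "") :: pvBmap t day rest)))
              = decide ¬(g < gd + pvEcnt (pvBmap t day rest)) := by
            simp only [pvEcnt, pvHasT, hT, if_true, hc, ne_eq, not_false_eq_true, decide_true,
              Bool.true_or, if_true, decide_eq_decide]
            tauto
          rw [hrhs]
          by_cases hgd : gd > g
          · simp only [hgd, if_true]
            have : ¬ ¬(g < gd + pvEcnt (pvBmap t day rest)) := by omega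
            simp [this]
          · simp only [hgd, if_false, (ih gd).1, decide_eq_decide]
            omega
        · simp only [Bool.not_eq_true] at hT
          have hEz := pvEcnt_of_not_hasT _ hT
          by_cases hgd : gd > g
          · simp only [hgd, if_true]
            simp [pvEcnt, pvHasT, hT, hc]
            omega
          · simp only [hgd, if_false, (ih gd).1]
            simp [pvEcnt, pvHasT, hT, hc, hEz]
            omega

-- A's loop from the initial state equals the day specification
theorem pvALoop_spec (t : List (List String)) (g day : Int) (l : List Int) :
    pvALoop t g day l false false 0 = pvDaySpec g (pvBmap t day l) := by
  induction l with
  | nil => simp [pvALoop, pvBmap, pvDaySpec]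
  | cons ts rest ih =>
    have hBm : pvBmap t day (ts :: rest) = decide (pvCell t ts day ≠ "") :: pvBmap t day rest := rfl
    by_cases hc : pvCell t ts day = ""
    · have : pvALoop t g day (ts :: rest) false false 0
          = pvALoop t g day rest false false 0 := by simp [pvALoop, hc]
      rw [this, ih, hBm]
      simp [pvDaySpec, hc]
    · have : pvALoop t g day (ts :: rest) false false 0
          = pvALoop t g day rest true false 0 := by simp [pvALoop, hc]
      rw [this, (pvALoop_started t g day rest 0).1, hBm]
      simp [pvDaySpec, hc]

-- B's scan after the first occupied slot has been seen
theorem pvBScan_started (t : List (List String)) (day : Int) (l : List Int) :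
    ∀ (pos f lv occ : Int),
      pvBScan t day l pos (some f) (some lv) occ
        = (some f,
           (if pvHasT (pvBmap t day l) = true then some (pos + pvLIdx (pvBmap t day l))
            else some lv),
           occ + pvCnt (pvBmap t day l)) := by
  induction l with
  | nil => intro pos f lv occ; simp [pvBScan, pvBmap, pvHasT, pvCnt]
  | cons ts rest ih =>
    intro pos f lv occ
    have hBm : pvBmap t day (ts :: rest) = decide (pvCell t ts day ≠ "") :: pvBmap t day rest := rfl
    by_cases hc : pvCell t ts day = ""
    · have : pvBScan t day (ts :: rest) pos (some f) (some lv) occ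
          = pvBScan t day rest (pos + 1) (some f) (some lv) occ := by simp [pvBScan, hc]
      rw [this, ih, hBm]
      by_cases hT : pvHasT (pvBmap t day rest) = true
      · simp only [pvHasT, pvLIdx, pvCnt, hc, ne_eq, not_true_eq_false, decide_false,
          Bool.false_or, hT, Bool.false_eq_true, if_false, if_true, Prod.mk.injEq,
          Option.some.injEq, true_and]
        omega
      · simp only [Bool.not_eq_true] at hT
        simp [pvHasT, pvCnt, hc, hT]
    · have : pvBScan t day (ts :: rest) pos (some f) (some lv) occ
          = pvBScan t day rest (pos + 1) (some f) (some pos) (occ + 1) := by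
        simp [pvBScan, hc]
      rw [this, ih, hBm]
      by_cases hT : pvHasT (pvBmap t day rest) = true
      · simp only [pvHasT, pvLIdx, pvCnt, hc, ne_eq, not_false_eq_true, decide_true,
          Bool.true_or, hT, if_true, Prod.mk.injEq, Option.some.injEq, true_and]
        omega
      · simp only [Bool.not_eq_true] at hT
        simp only [pvHasT, pvLIdx, pvCnt, hc, ne_eq, not_false_eq_true, decide_true,
          Bool.true_or, hT, Bool.false_eq_true, if_false, if_true, Prod.mk.injEq,
          Option.some.injEq, true_and]
        omega

-- B's per-day verdict equals the day specification (generalized over the start position)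
theorem pvBScan_spec (t : List (List String)) (g day : Int) (l : List Int) :
    ∀ pos : Int,
      (match pvBScan t day l pos none none 0 with
       | (some f, some lv, occ) => decide ¬(0 < lv - f + 1 - occ ∧ g < lv - f + 1 - occ)
       | _ => true)
        = pvDaySpec g (pvBmap t day l) := by
  induction l with
  | nil => intro pos; simp [pvBScan, pvBmap, pvDaySpec]
  | cons ts rest ih =>
    intro pos
    have hBm : pvBmap t day (ts :: rest) = decide (pvCell t ts day ≠ "") :: pvBmap t day rest := rfl
    by_cases hc : pvCell t ts day = ""
    · have : pvBScan t day (ts :: rest) pos none none 0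
          = pvBScan t day rest (pos + 1) none none 0 := by simp [pvBScan, hc]
      rw [this, ih (pos + 1), hBm]
      simp [pvDaySpec, hc]
    · have : pvBScan t day (ts :: rest) pos none none 0
          = pvBScan t day rest (pos + 1) (some pos) (some pos) 1 := by simp [pvBScan, hc]
      rw [this, pvBScan_started t day rest (pos + 1) pos pos 1, hBm]
      by_cases hT : pvHasT (pvBmap t day rest) = true
      · have hL := pvLIdx_eq _ hT
        have hE0 := pvEcnt_nonneg (pvBmap t day rest)
        have hC0 := pvCnt_nonneg (pvBmap t day rest)
        simp only [hT, if_true, pvDaySpec, hc, ne_eq, not_false_eq_true, decide_true]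
        have harith : pos + 1 + pvLIdx (pvBmap t day rest) - pos + 1 - (1 + pvCnt (pvBmap t day rest))
            = pvEcnt (pvBmap t day rest) := by omega
        rw [harith]
      · have hEz := pvEcnt_of_not_hasT _ (by simpa using hT)
        simp only [hT, pvDaySpec, hc, ne_eq, not_false_eq_true, decide_true]
        rw [hEz]
        have hCz := pvCnt_of_not_hasT _ (by simpa using hT)
        rw [hCz]
        simp

theorem pvDays_eq (t : List (List String)) (g : Int) (ds : List Int) :
    pvADays t g ds = pvBDays t g ds := by
  induction ds with
  | nil => rfl
  | cons day rest ih =>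
    have hday : pvALoop t g day (PySem.List.pyRange 1 (PySem.List.len t) 2) false false 0
        = pvBDayGo t g day (PySem.List.pyRange 1 (PySem.List.len t) 2) := by
      rw [pvALoop_spec, pvBDayGo, pvBScan_spec]
    simp only [pvADays, pvBDays, hday, ih]

-- ===== VERDICT (by name: the statement is the Claim_ definition above) =====
theorem det_g_flag_spec : Claim_equal_det_g_flag := by
  intro t g _dom _pre
  unfold Spec_det_g_flag det_g_flag det_g_flag_alt
  exact pvDays_eq t g _
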